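-- pv_equiv track=rewrite | github.com/dalingk/advent-of-code | day7p1.py | isABBA
-- ===== SOURCE A (Python) =====
-- def isABBA(item):
--     for i, char in enumerate(item):
--         if i + 4 > len(item):
--             return False
--         if item.rindex(char) != i:
--             if item[i] == item[i + 3] and item[i + 1] == item[i + 2] and item[i] != item[i + 1]:
--                 return True
--     return False
-- ===== SOURCE B (Python) =====
-- import re
--
-- # an ABBA block: some char, a different char, then the mirror image; DOTALL so '.' also matches newlines
-- _ABBA_RE = re.compile(r'(.)(?!\1)(.)\2\1', re.DOTALL)
--
-- def isABBA(item):
--     return _ABBA_RE.search(item) is not None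
-- ===== Notes on version B (the rewrite author's own statement) =====
-- stated objective: idiomatic
-- what changed: Replaces the explicit index loop with its per-position rindex scan by a single compiled regular-expression search (backreferences plus a negative lookahead describe the a-b-b-a block declaratively).
import Mathlib
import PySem

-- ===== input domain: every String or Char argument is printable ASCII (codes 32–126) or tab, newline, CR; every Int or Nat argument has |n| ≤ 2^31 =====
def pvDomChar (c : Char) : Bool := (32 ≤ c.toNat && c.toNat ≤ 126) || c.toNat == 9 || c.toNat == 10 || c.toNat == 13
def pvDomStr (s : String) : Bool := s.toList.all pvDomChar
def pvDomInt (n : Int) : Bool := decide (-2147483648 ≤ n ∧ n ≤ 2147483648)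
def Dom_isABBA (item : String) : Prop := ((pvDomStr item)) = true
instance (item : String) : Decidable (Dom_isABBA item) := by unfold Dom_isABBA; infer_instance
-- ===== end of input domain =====

-- B replaces A's index loop (with its redundant rindex pruning) by a regular-expression
-- search for the fixed pattern (.)(?!\1)(.)\2\1 with DOTALL; same return value, more idiomatic.

-- ===== PORT A =====
-- hand port of item.rindex(char) for a one-char needle: index of the LAST occurrence.
-- (A only calls it with char ∈ item, so the ValueError branch of Python's rindex is unreachable.)
def pyRindex1 (l : List Char) (c : Char) : Int :=
  (l.length : Int) - 1 - (l.reverse.idxOf c : Int)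

def isABBAloop (item : List Char) : List (Int × Char) → Bool
  | [] => false
  | (i, c) :: rest =>
    if i + 4 > (item.length : Int) then false
    else if pyRindex1 item c ≠ i then
      if PySem.List.pyGetD item i ' ' == PySem.List.pyGetD item (i + 3) ' ' &&
         PySem.List.pyGetD item (i + 1) ' ' == PySem.List.pyGetD item (i + 2) ' ' &&
         !(PySem.List.pyGetD item i ' ' == PySem.List.pyGetD item (i + 1) ' ')
      then true
      else isABBAloop item rest
    else isABBAloop item rest

def isABBA (item : String) : Bool :=
  isABBAloop item.toList (PySem.List.enumerate item.toList 0)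

-- ===== PORT B =====
-- Hand port of re.search with the fixed pattern (.)(?!\1)(.)\2\1 under re.DOTALL, exact on all
-- strings: the engine tries a match at each start position from the left; at one position the
-- pattern matches iff four characters remain (DOTALL: '.' matches any char, including '\n'),
-- the lookahead rejects a second char equal to the first, and \2 \1 demand the mirror.
def reMatchABBA : List Char → Bool
  | a :: b :: c :: d :: _ => !(a == b) && b == c && a == d
  | _ => false

def reSearchABBA : List Char → Bool
  | [] => false
  | x :: rest => reMatchABBA (x :: rest) || reSearchABBA rest

def isABBA_alt (item : String) : Bool :=
  reSearchABBA item.toList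

-- ===== PRECONDITION & SPEC =====
def Spec_isABBA (item : String) (out : Bool) : Prop := out = isABBA_alt item
instance (item : String) (out : Bool) : Decidable (Spec_isABBA item out) := by unfold Spec_isABBA; infer_instance

-- ===== CLAIM (what is proved, stated in full; the proofs are below) =====
def Claim_equal_isABBA : Prop := ∀ (item : String), Dom_isABBA item → Spec_isABBA item (isABBA item)

-- ===== LEMMAS AND PROOFS =====

-- the window test on the actual characters
def pvWin (l : List Char) (k : Nat) : Bool :=
  l.getD k ' ' == l.getD (k + 3) ' ' && l.getD (k + 1) ' ' == l.getD (k + 2) ' ' &&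
    !(l.getD k ' ' == l.getD (k + 1) ' ')

-- if l[j] = c then the first index of c is ≤ j
theorem pvIdxOf_le {l : List Char} {j : Nat} {c : Char} (hj : j < l.length) (h : l[j] = c) :
    l.idxOf c ≤ j := by
  induction l generalizing j with
  | nil => simp at hj
  | cons x xs ih =>
    cases j with
    | zero => simp_all
    | succ j =>
      simp only [List.getElem_cons_succ] at h
      simp only [List.idxOf_cons]
      cases hxc : x == c
      · simp only [cond_false]
        exact Nat.succ_le_succ (ih (by simpa using hj) h)
      · simp

-- A's rindex guard is redundant: a true window at k forces the last occurrence past k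
theorem pvRindex_ne {l : List Char} {k : Nat} (hk : k + 4 ≤ l.length)
    (hw : pvWin l k = true) : pyRindex1 l (l.getD k ' ') ≠ (k : Int) := by
  have h3 : k + 3 < l.length := by omega
  have hkl : k < l.length := by omega
  simp only [pvWin, Bool.and_eq_true, beq_iff_eq, List.getD_eq_getElem l ' ' hkl,
    List.getD_eq_getElem l ' ' h3] at hw
  have h03 : l[k] = l[k + 3] := hw.1.1
  have hrev : l.reverse[l.length - 1 - (k + 3)]'(by simp; omega) = l[k + 3] := by
    rw [List.getElem_reverse]; congr 1; omega
  have hle : l.reverse.idxOf (l[k]) ≤ l.length - 1 - (k + 3) :=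
    pvIdxOf_le (by simp; omega) (by rw [hrev, ← h03])
  unfold pyRindex1
  rw [List.getD_eq_getElem l ' ' hkl]
  omega

-- the if-condition of A's loop at index s is the window test
theorem pvCond_eq (l : List Char) (s : Nat) :
    (PySem.List.pyGetD l (s : Int) ' ' == PySem.List.pyGetD l ((s : Int) + 3) ' ' &&
     (PySem.List.pyGetD l ((s : Int) + 1) ' ' == PySem.List.pyGetD l ((s : Int) + 2) ' ') &&
     !(PySem.List.pyGetD l (s : Int) ' ' == PySem.List.pyGetD l ((s : Int) + 1) ' '))
      = pvWin l s := by
  have e1 : (s : Int) + 1 = ((s + 1 : Nat) : Int) := by push_cast; ring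
  have e2 : (s : Int) + 2 = ((s + 2 : Nat) : Int) := by push_cast; ring
  have e3 : (s : Int) + 3 = ((s + 3 : Nat) : Int) := by push_cast; ring
  simp only [e1, e2, e3, PySem.List.pyGetD_natCast, pvWin]

theorem pvLoop_iff (l : List Char) (xs : List Char) (s : Nat) :
    isABBAloop l (PySem.List.enumerate xs (s : Int)) = true ↔
      ∃ k, k < xs.length ∧ s + k + 4 ≤ l.length ∧
        pyRindex1 l (xs.getD k ' ') ≠ ((s + k : Nat) : Int) ∧ pvWin l (s + k) = true := by
  induction xs generalizing s with
  | nil =>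
    simp [PySem.List.enumerate_nil, isABBAloop]
  | cons x xs ih =>
    rw [PySem.List.enumerate_cons]
    have ecast : (s : Int) + 1 = ((s + 1 : Nat) : Int) := by push_cast; ring
    simp only [isABBAloop]
    rw [pvCond_eq]
    simp only [ecast, List.length_cons]
    rcases lt_or_ge l.length (s + 4) with h4 | h4
    · rw [if_pos (by exact_mod_cast h4)]
      constructor
      · intro h; exact absurd h Bool.false_ne_true
      · rintro ⟨k, -, hlen, -, -⟩; exact absurd hlen (by omega)
    · rw [if_neg (by omega)]
      by_cases hg : pyRindex1 l x ≠ (s : Int)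
      · rw [if_pos hg]
        by_cases hw : pvWin l s = true
        · rw [hw, if_pos rfl]
          constructor
          · intro _
            exact ⟨0, by simp, by omega, by simpa using hg, by simpa using hw⟩
          · intro _; rfl
        · rw [if_neg (by simpa using hw), ih (s + 1)]
          constructor
          · rintro ⟨k, hk, hlen, hgd, hwk⟩
            refine ⟨k + 1, by omega, by omega, ?_, ?_⟩
            · have : s + 1 + k = s + (k + 1) := by omega
              simpa [List.getD_cons_succ, this] using hgd
            · have : s + 1 + k = s + (k + 1) := by omega
              simpa [this] using hwk
          · rintro ⟨k, hk, hlen, hgd, hwk⟩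
            cases k with
            | zero => exact absurd (by simpa using hwk) hw
            | succ k =>
              refine ⟨k, by omega, by omega, ?_, ?_⟩
              · have : s + (k + 1) = s + 1 + k := by omega
                simpa [List.getD_cons_succ, this] using hgd
              · have : s + (k + 1) = s + 1 + k := by omega
                simpa [this] using hwk
      · rw [if_neg hg, ih (s + 1)]
        rw [not_not] at hg
        constructor
        · rintro ⟨k, hk, hlen, hgd, hwk⟩
          refine ⟨k + 1, by omega, by omega, ?_, ?_⟩
          · have : s + 1 + k = s + (k + 1) := by omega
            simpa [List.getD_cons_succ, this] using hgd
          · have : s + 1 + k = s + (k + 1) := by omega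
            simpa [this] using hwk
        · rintro ⟨k, hk, hlen, hgd, hwk⟩
          cases k with
          | zero => exact absurd (by simpa using hg) (by simpa using hgd)
          | succ k =>
            refine ⟨k, by omega, by omega, ?_, ?_⟩
            · have : s + (k + 1) = s + 1 + k := by omega
              simpa [List.getD_cons_succ, this] using hgd
            · have : s + (k + 1) = s + 1 + k := by omega
              simpa [this] using hwk

-- A returns true exactly when some in-bounds window is an ABBA
theorem pvA_iff (item : String) :
    isABBA item = true ↔
      ∃ k, k + 4 ≤ item.toList.length ∧ pvWin item.toList k = true := by
  unfold isABBA
  rw [show (0 : Int) = ((0 : Nat) : Int) from rfl, pvLoop_iff]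
  constructor
  · rintro ⟨k, -, hlen, -, hwk⟩
    exact ⟨k, by omega, by simpa using hwk⟩
  · rintro ⟨k, hlen, hwk⟩
    refine ⟨k, by omega, by omega, ?_, by simpa using hwk⟩
    have := pvRindex_ne (l := item.toList) (k := k) hlen hwk
    simpa using this

-- shifting the window past the head character
theorem pvWin_cons (x : Char) (xs : List Char) (k : Nat) :
    pvWin (x :: xs) (k + 1) = pvWin xs k := by
  simp only [pvWin, show k + 1 + 3 = (k + 3) + 1 by omega, show k + 1 + 1 = (k + 1) + 1 by omega,
    show k + 1 + 2 = (k + 2) + 1 by omega, List.getD_cons_succ]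

-- one regex-match attempt succeeds iff the window at position 0 is in bounds and an ABBA
theorem pvMatch_iff (l : List Char) :
    reMatchABBA l = true ↔ 4 ≤ l.length ∧ pvWin l 0 = true := by
  match l with
  | [] => simp [reMatchABBA]
  | [a] => simp [reMatchABBA]
  | [a, b] => simp [reMatchABBA]
  | [a, b, c] => simp [reMatchABBA]
  | a :: b :: c :: d :: t =>
    simp only [reMatchABBA, pvWin, List.length_cons, List.getD_cons_zero, List.getD_cons_succ,
      Bool.and_eq_true, Bool.not_eq_eq_eq_not, Bool.not_true, beq_eq_false_iff_ne, beq_iff_eq]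
    constructor
    · rintro ⟨⟨hab, hbc⟩, had⟩; exact ⟨by omega, ⟨had, hbc⟩, hab⟩
    · rintro ⟨-, ⟨had, hbc⟩, hab⟩; exact ⟨⟨hab, hbc⟩, had⟩

-- B returns true exactly when some in-bounds window is an ABBA
theorem pvB_iff (item : String) :
    isABBA_alt item = true ↔
      ∃ k, k + 4 ≤ item.toList.length ∧ pvWin item.toList k = true := by
  unfold isABBA_alt
  generalize item.toList = l
  induction l with
  | nil =>
    simp only [reSearchABBA, List.length_nil]
    constructor
    · intro h; exact absurd h Bool.false_ne_true
    · rintro ⟨k, hk, -⟩; omega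
  | cons x xs ih =>
    simp only [reSearchABBA, Bool.or_eq_true, ih, pvMatch_iff, List.length_cons]
    constructor
    · rintro (⟨hlen, hw⟩ | ⟨k, hk, hw⟩)
      · exact ⟨0, by omega, hw⟩
      · exact ⟨k + 1, by omega, by rw [pvWin_cons]; exact hw⟩
    · rintro ⟨k, hk, hw⟩
      cases k with
      | zero => exact Or.inl ⟨by omega, hw⟩
      | succ k => exact Or.inr ⟨k, by omega, by rwa [pvWin_cons] at hw⟩

-- ===== VERDICT (by name: the statement is the Claim_ definition above) =====
theorem isABBA_spec : Claim_equal_isABBA := by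
  intro item _
  unfold Spec_isABBA
  have := (pvA_iff item).trans (pvB_iff item).symm
  cases hA : isABBA item <;> cases hB : isABBA_alt item <;> simp_all
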